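-- pv_equiv track=rewrite | github.com/Zunza5/SentenceSplitter | data_sentence.py | chunk_sentences_by_chars
-- ===== SOURCE A (Python) =====
-- def chunk_sentences_by_chars(sentences: list[list[str]], max_chars: int = 2048, stride_chars: int = 1024) -> list[tuple[list[list[str]], int]]:
--     """Group sentences such that their combined length is approx `max_chars`, sliding by `stride_chars`."""
--     chunks = []
--     current_chunk = []
--     current_len = 0
--     current_offset = 0
--
--     i = 0
--     while i < len(sentences):
--         sent = sentences[i]
--         sent_len = sum(len(w) for w in sent) + len(sent)
--
--         if current_len + sent_len > max_chars and current_chunk: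
--             chunks.append((list(current_chunk), current_offset))
--             dropped_len = 0
--             while dropped_len < stride_chars and current_chunk:
--                 dropped_sent = current_chunk.pop(0)
--                 d_len = sum(len(w) for w in dropped_sent) + len(dropped_sent)
--                 dropped_len += d_len
--                 current_offset += d_len
--             current_len -= dropped_len
--         else:
--             current_chunk.append(sent)
--             current_len += sent_len
--             i += 1
--
--     if current_chunk:
--         chunks.append((current_chunk, current_offset))
--
--     return chunks
-- ===== SOURCE B (Python) =====
-- def chunk_sentences_by_chars(sentences: list[list[str]], max_chars: int = 2048, stride_chars: int = 1024) -> list[tuple[list[list[str]], int]]: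
--     """Index-based sliding window over prefix sums: no mutable FIFO, no pop(0)."""
--     n = len(sentences)
--     P = [0] * (n + 1)
--     for k, sent in enumerate(sentences):
--         P[k + 1] = P[k] + sum(len(w) for w in sent) + len(sent)
--     chunks = []
--     s = 0
--     i = 0
--     while i < n:
--         if P[i] - P[s] + (P[i + 1] - P[i]) > max_chars and s < i:
--             chunks.append((sentences[s:i], P[s]))
--             target = P[s] + stride_chars
--             while s < i and P[s] < target:
--                 s += 1
--         else:
--             i += 1
--     if s < i:
--         chunks.append((sentences[s:i], P[s]))
--     return chunks
-- ===== Notes on version B (the rewrite author's own statement) =====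
-- stated objective: faster
-- what changed: Replaces A's mutable FIFO window (repeated pop(0) and recomputing each dropped sentence's length) with two indices into the original list plus a precomputed prefix-sum array, so windows are slices and all length arithmetic is prefix-sum differences.
import Mathlib
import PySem

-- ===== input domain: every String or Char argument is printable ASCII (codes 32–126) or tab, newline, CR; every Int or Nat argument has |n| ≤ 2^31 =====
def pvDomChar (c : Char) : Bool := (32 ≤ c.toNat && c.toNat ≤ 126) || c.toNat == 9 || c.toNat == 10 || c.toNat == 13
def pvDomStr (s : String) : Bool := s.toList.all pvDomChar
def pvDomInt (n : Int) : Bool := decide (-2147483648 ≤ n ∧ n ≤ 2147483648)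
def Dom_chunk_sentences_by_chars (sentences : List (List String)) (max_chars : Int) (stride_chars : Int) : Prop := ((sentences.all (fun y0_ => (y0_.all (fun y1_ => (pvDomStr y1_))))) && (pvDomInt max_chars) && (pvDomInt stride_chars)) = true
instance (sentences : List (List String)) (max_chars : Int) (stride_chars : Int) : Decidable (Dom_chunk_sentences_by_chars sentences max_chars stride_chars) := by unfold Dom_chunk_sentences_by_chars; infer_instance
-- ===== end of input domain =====

-- B replaces A's mutable FIFO window (repeated pop(0) and per-drop length recomputation) by two
-- indices into the original list plus a prefix-sum array; objective: faster (no pop(0) shifting,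
-- each sentence's length summed once).

-- ===== PORT A =====
-- sum(len(w) for w in sent) + len(sent)
def pvSentLen (sent : List String) : Int :=
  (sent.map (fun w => PySem.Str.len w)).sum + sent.length

-- the inner `while dropped_len < stride_chars and current_chunk:` pop loop
def pvDropA (stride : Int) : List (List String) → Int → Int → (List (List String) × Int × Int)
  | [], dropped, offset => ([], dropped, offset)
  | c :: rest, dropped, offset =>
      if dropped < stride then
        pvDropA stride rest (dropped + pvSentLen c) (offset + pvSentLen c)
      else (c :: rest, dropped, offset)

-- the outer `while i < len(sentences):` loop; fuel only makes the recursion total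
-- (the Python loop diverges when stride_chars ≤ 0 and the window overflows; 2*n+2 fuel suffices whenever the Python terminates)
def pvLoopA (sentences : List (List String)) (max_chars stride : Int) :
    Nat → Nat → List (List (List String) × Int) → List (List String) → Int → Int →
    List (List (List String) × Int)
  | 0, _, chunks, _, _, _ => chunks
  | fuel+1, i, chunks, cur, clen, coff =>
    if i < sentences.length then
      let sent := sentences.getD i []
      let slen := pvSentLen sent
      if clen + slen > max_chars ∧ cur ≠ [] then
        let r := pvDropA stride cur 0 coff
        pvLoopA sentences max_chars stride fuel i (chunks ++ [(cur, coff)]) r.1 (clen - r.2.1) r.2.2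
      else
        pvLoopA sentences max_chars stride fuel (i+1) chunks (cur ++ [sent]) (clen + slen) coff
    else if cur ≠ [] then chunks ++ [(cur, coff)] else chunks

def chunk_sentences_by_chars (sentences : List (List String)) (max_chars : Int) (stride_chars : Int) : List (List (List String) × Int) :=
  pvLoopA sentences max_chars stride_chars (2 * sentences.length + 2) 0 [] [] 0 0

-- ===== PORT B =====
-- P[0..n]: prefix sums of the sentence lengths (Source B's building loop)
def pvPrefix : List (List String) → Int → List Int
  | [], acc => [acc]
  | s :: rest, acc => acc :: pvPrefix rest (acc + pvSentLen s)

-- `while s < i and P[s] < target: s += 1`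
def pvAdv (P : List Int) (i : Nat) (target : Int) (s : Nat) : Nat :=
  if h : s < i ∧ P.getD s 0 < target then pvAdv P i target (s + 1) else s
termination_by i - s
decreasing_by omega

-- Source B's main loop; sentences[s:i] with 0 ≤ s ≤ i is exactly (drop s).take (i-s);
-- P[k] with 0 ≤ k ≤ n is exactly getD; fuel only makes the recursion total (see pvLoopA)
def pvLoopB (sentences : List (List String)) (max_chars stride : Int) (P : List Int) :
    Nat → Nat → Nat → List (List (List String) × Int) → List (List (List String) × Int)
  | 0, _, _, chunks => chunks
  | fuel+1, s, i, chunks =>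
    if i < sentences.length then
      if P.getD i 0 - P.getD s 0 + (P.getD (i+1) 0 - P.getD i 0) > max_chars ∧ s < i then
        pvLoopB sentences max_chars stride P fuel
          (pvAdv P i (P.getD s 0 + stride) s) i
          (chunks ++ [((sentences.drop s).take (i - s), P.getD s 0)])
      else
        pvLoopB sentences max_chars stride P fuel s (i+1) chunks
    else if s < i then chunks ++ [((sentences.drop s).take (i - s), P.getD s 0)] else chunks

def chunk_sentences_by_chars_alt (sentences : List (List String)) (max_chars : Int) (stride_chars : Int) : List (List (List String) × Int) :=
  pvLoopB sentences max_chars stride_chars (pvPrefix sentences 0) (2 * sentences.length + 2) 0 0 []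

-- ===== PRECONDITION & SPEC =====
def Spec_chunk_sentences_by_chars (sentences : List (List String)) (max_chars : Int) (stride_chars : Int) (out : List (List (List String) × Int)) : Prop := out = chunk_sentences_by_chars_alt sentences max_chars stride_chars
instance (sentences : List (List String)) (max_chars : Int) (stride_chars : Int) (out : List (List (List String) × Int)) : Decidable (Spec_chunk_sentences_by_chars sentences max_chars stride_chars out) := by unfold Spec_chunk_sentences_by_chars; infer_instance

-- ===== CLAIM (what is proved, stated in full; the proofs are below) =====
def Claim_equal_chunk_sentences_by_chars : Prop := ∀ (sentences : List (List String)) (max_chars : Int) (stride_chars : Int), Dom_chunk_sentences_by_chars sentences max_chars stride_chars → Spec_chunk_sentences_by_chars sentences max_chars stride_chars (chunk_sentences_by_chars sentences max_chars stride_chars)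

-- ===== LEMMAS AND PROOFS =====

-- prefix-sum value at k
def pvPfun (ss : List (List String)) (k : Nat) : Int := ((ss.take k).map pvSentLen).sum

-- the window sentences[s:i]
def pvWin (ss : List (List String)) (s i : Nat) : List (List String) :=
  (ss.drop s).take (i - s)

theorem pvPrefix_getD (ss : List (List String)) (acc : Int) (k : Nat) (hk : k <= ss.length) :
    (pvPrefix ss acc).getD k 0 = acc + pvPfun ss k := by
  induction ss generalizing acc k with
  | nil =>
    have hk0 : k = 0 := by simpa using hk
    subst hk0; simp [pvPrefix, pvPfun]
  | cons c rest ih =>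
    cases k with
    | zero => simp [pvPrefix, pvPfun]
    | succ k =>
      simp only [pvPrefix, List.getD_cons_succ]
      rw [ih (acc + pvSentLen c) k (by simpa using hk)]
      simp only [pvPfun, List.take_succ_cons, List.map_cons, List.sum_cons]
      ring

theorem pvPfun_succ (ss : List (List String)) (t : Nat) (ht : t < ss.length) :
    pvPfun ss (t + 1) = pvPfun ss t + pvSentLen (ss.getD t []) := by
  have ht' : t < (ss.map pvSentLen).length := by simpa using ht
  rw [pvPfun, pvPfun, List.map_take, List.map_take, List.sum_take_succ _ _ ht']
  simp [List.getD_eq_getElem?_getD, List.getElem?_eq_getElem ht]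

theorem pvWin_self (ss : List (List String)) (s : Nat) : pvWin ss s s = [] := by
  simp [pvWin]

theorem pvWin_ne_nil (ss : List (List String)) (s i : Nat) (h : s < i) (hi : i <= ss.length) :
    pvWin ss s i ≠ [] := by
  intro hnil
  have := congrArg List.length hnil
  simp only [pvWin, List.length_take, List.length_drop, List.length_nil] at this
  omega

theorem pvWin_cons (ss : List (List String)) (s i : Nat) (h : s < i) (hi : i <= ss.length) :
    pvWin ss s i = ss.getD s [] :: pvWin ss (s + 1) i := by
  have hs : s < ss.length := by omega
  rw [pvWin, List.drop_eq_getElem_cons hs]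
  have h1 : i - s = (i - (s + 1)) + 1 := by omega
  rw [h1, List.take_succ_cons, pvWin]
  simp [List.getD_eq_getElem?_getD, List.getElem?_eq_getElem hs]

theorem pvWin_snoc (ss : List (List String)) (s i : Nat) (h : s <= i) (hi : i < ss.length) :
    pvWin ss s i ++ [ss.getD i []] = pvWin ss s (i + 1) := by
  have h1 : i + 1 - s = (i - s) + 1 := by omega
  rw [pvWin, pvWin, h1, List.take_add_one]
  have h2 : (ss.drop s)[i - s]? = some ss[i] := by
    have e : s + (i - s) = i := by omega
    rw [List.getElem?_drop, e, List.getElem?_eq_getElem hi]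
  simp [h2, List.getD_eq_getElem?_getD, List.getElem?_eq_getElem hi]

theorem pvAdv_bounds (P : List Int) (i : Nat) (target : Int) (s : Nat) (h : s <= i) :
    s <= pvAdv P i target s ∧ pvAdv P i target s <= i := by
  induction s using pvAdv.induct P i target with
  | case1 s hc ih =>
    rw [pvAdv, dif_pos hc]
    have := ih (by omega)
    omega
  | case2 s hc =>
    rw [pvAdv, dif_neg hc]
    omega

theorem pvDropA_eq (ss : List (List String)) (stride : Int) (s0 i : Nat) (off0 : Int)
    (hi : i <= ss.length) :
    ∀ t, s0 <= t → t <= i →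
    pvDropA stride (pvWin ss t i) (pvPfun ss t - pvPfun ss s0) (off0 + (pvPfun ss t - pvPfun ss s0)) =
      (pvWin ss (pvAdv (pvPrefix ss 0) i (pvPfun ss s0 + stride) t) i,
       pvPfun ss (pvAdv (pvPrefix ss 0) i (pvPfun ss s0 + stride) t) - pvPfun ss s0,
       off0 + (pvPfun ss (pvAdv (pvPrefix ss 0) i (pvPfun ss s0 + stride) t) - pvPfun ss s0)) := by
  intro t hst hti
  induction t using pvAdv.induct (pvPrefix ss 0) i (pvPfun ss s0 + stride) with
  | case1 t hc ih =>
    obtain ⟨hti', hP⟩ := hc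
    rw [pvPrefix_getD ss 0 t (by omega)] at hP
    have hAdv : pvAdv (pvPrefix ss 0) i (pvPfun ss s0 + stride) t
        = pvAdv (pvPrefix ss 0) i (pvPfun ss s0 + stride) (t + 1) := by
      rw [pvAdv]
      exact dif_pos ⟨hti', by rw [pvPrefix_getD ss 0 t (by omega)]; omega⟩
    have hlen : pvPfun ss t + pvSentLen (ss.getD t []) = pvPfun ss (t + 1) :=
      (pvPfun_succ ss t (by omega)).symm
    have e1 : pvPfun ss t - pvPfun ss s0 + pvSentLen (ss.getD t []) = pvPfun ss (t+1) - pvPfun ss s0 := by omega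
    have e2 : off0 + (pvPfun ss t - pvPfun ss s0) + pvSentLen (ss.getD t []) = off0 + (pvPfun ss (t+1) - pvPfun ss s0) := by omega
    rw [pvWin_cons ss t i hti' hi, pvDropA, if_pos (by omega), e1, e2, hAdv]
    exact ih (by omega) (by omega)
  | case2 t hc =>
    rw [pvAdv, dif_neg hc]
    by_cases hti' : t < i
    · have hP : ¬ (pvPrefix ss 0).getD t 0 < pvPfun ss s0 + stride := fun h => hc ⟨hti', h⟩
      rw [pvPrefix_getD ss 0 t (by omega)] at hP
      rw [pvWin_cons ss t i hti' hi, pvDropA, if_neg (by omega),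
        ← pvWin_cons ss t i hti' hi]
    · have ht : t = i := by omega
      subst ht
      rw [pvWin_self, pvDropA]

theorem pvLoop_eq (ss : List (List String)) (mx st : Int) :
    ∀ fuel s i chunks, s <= i → i <= ss.length →
    pvLoopA ss mx st fuel i chunks (pvWin ss s i) (pvPfun ss i - pvPfun ss s) (pvPfun ss s) =
      pvLoopB ss mx st (pvPrefix ss 0) fuel s i chunks := by
  intro fuel
  induction fuel with
  | zero => intro s i chunks _ _; rfl
  | succ fuel ih =>
    intro s i chunks hsi hin
    simp only [pvLoopA, pvLoopB]
    by_cases hi : i < ss.length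
    · rw [if_pos hi, if_pos hi]
      have hPi := pvPrefix_getD ss 0 i (by omega)
      have hPs := pvPrefix_getD ss 0 s (by omega)
      have hPi1 := pvPrefix_getD ss 0 (i+1) (by omega)
      have hsucc := pvPfun_succ ss i hi
      by_cases hc : pvPfun ss i - pvPfun ss s + pvSentLen (ss.getD i []) > mx ∧ s < i
      · have hcA : pvPfun ss i - pvPfun ss s + pvSentLen (ss.getD i []) > mx ∧ pvWin ss s i ≠ [] :=
          ⟨hc.1, pvWin_ne_nil ss s i hc.2 (by omega)⟩
        have hcB : (pvPrefix ss 0).getD i 0 - (pvPrefix ss 0).getD s 0 +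
            ((pvPrefix ss 0).getD (i+1) 0 - (pvPrefix ss 0).getD i 0) > mx ∧ s < i := by
          rw [hPi, hPs, hPi1]
          exact ⟨by omega, hc.2⟩
        rw [if_pos hcA, if_pos hcB]
        have hdrop := pvDropA_eq ss st s i (pvPfun ss s) (by omega) s le_rfl (by omega)
        simp only [sub_self, add_zero] at hdrop
        rw [hdrop]
        have hadv := pvAdv_bounds (pvPrefix ss 0) i (pvPfun ss s + st) s (by omega)
        rw [hPs]
        have hz : (0 : Int) + pvPfun ss s = pvPfun ss s := by ring
        rw [hz]
        set s' := pvAdv (pvPrefix ss 0) i (pvPfun ss s + st) s with hs'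
        have e1 : pvPfun ss i - pvPfun ss s - (pvPfun ss s' - pvPfun ss s) = pvPfun ss i - pvPfun ss s' := by ring
        have e2 : pvPfun ss s + (pvPfun ss s' - pvPfun ss s) = pvPfun ss s' := by ring
        simp only []
        rw [e1, e2, ih s' i _ hadv.2 (by omega)]
        rfl
      · have hcA : ¬ (pvPfun ss i - pvPfun ss s + pvSentLen (ss.getD i []) > mx ∧ pvWin ss s i ≠ []) := by
          intro hcon
          apply hc
          refine ⟨hcon.1, ?_⟩
          by_contra hsi'
          have hse : s = i := by omega
          subst hse
          exact hcon.2 (pvWin_self ss s)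
        have hcB : ¬ ((pvPrefix ss 0).getD i 0 - (pvPrefix ss 0).getD s 0 +
            ((pvPrefix ss 0).getD (i+1) 0 - (pvPrefix ss 0).getD i 0) > mx ∧ s < i) := by
          rw [hPi, hPs, hPi1]
          intro hcon
          exact hc ⟨by omega, hcon.2⟩
        rw [if_neg hcA, if_neg hcB, pvWin_snoc ss s i hsi hi]
        have e1 : pvPfun ss i - pvPfun ss s + pvSentLen (ss.getD i []) = pvPfun ss (i+1) - pvPfun ss s := by omega
        rw [e1]
        exact ih s (i+1) chunks (by omega) (by omega)
    · rw [if_neg hi, if_neg hi]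
      by_cases hlt : s < i
      · rw [if_pos (pvWin_ne_nil ss s i hlt hin), if_pos hlt,
          pvPrefix_getD ss 0 s (by omega), pvWin]
        norm_num
      · have hse : s = i := by omega
        subst hse
        rw [if_neg (by simp [pvWin_self]), if_neg (by omega)]

-- ===== VERDICT (by name: the statement is the Claim_ definition above) =====
theorem chunk_sentences_by_chars_spec : Claim_equal_chunk_sentences_by_chars := by
  intro ss mx st _
  unfold Spec_chunk_sentences_by_chars chunk_sentences_by_chars chunk_sentences_by_chars_alt
  have h := pvLoop_eq ss mx st (2 * ss.length + 2) 0 0 [] le_rfl (by omega)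
  simpa [pvWin_self, pvPfun] using h
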